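-- pv_equiv track=rewrite | github.com/WildstarStudios/Blender2.7-tools | exporter/export.py | get_validation_message
-- ===== SOURCE A (Python) =====
-- def get_validation_message(issues):
--     """Get the main validation message"""
--     error_count = sum(1 for issue in issues if issue['type'] == 'ERROR')
--     warning_count = sum(1 for issue in issues if issue['type'] == 'WARNING')
--
--     if error_count > 0 and warning_count > 0:
--         return "Found %d errors and %d warnings" % (error_count, warning_count)
--     elif error_count > 0:
--         return "Found %d errors" % error_count
--     elif warning_count > 0:
--         return "Found %d warnings" % warning_count
--     else:
--         return "No issues found"
-- ===== SOURCE B (Python) =====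
-- def get_validation_message(issues):
--     """Get the main validation message"""
--     error_count = 0
--     warning_count = 0
--     for issue in issues:
--         t = issue['type']
--         if t == 'ERROR':
--             error_count += 1
--         elif t == 'WARNING':
--             warning_count += 1
--     parts = []
--     if error_count > 0:
--         parts.append('%d errors' % error_count)
--     if warning_count > 0:
--         parts.append('%d warnings' % warning_count)
--     return 'Found ' + ' and '.join(parts) if parts else 'No issues found'
-- ===== Notes on version B (the rewrite author's own statement) =====
-- stated objective: simpler
-- what changed: One pass over the issues accumulating both counts (instead of two generator sums), then list-assembly of message parts joined with ' and ' instead of the four-branch format cascade.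
import Mathlib
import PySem

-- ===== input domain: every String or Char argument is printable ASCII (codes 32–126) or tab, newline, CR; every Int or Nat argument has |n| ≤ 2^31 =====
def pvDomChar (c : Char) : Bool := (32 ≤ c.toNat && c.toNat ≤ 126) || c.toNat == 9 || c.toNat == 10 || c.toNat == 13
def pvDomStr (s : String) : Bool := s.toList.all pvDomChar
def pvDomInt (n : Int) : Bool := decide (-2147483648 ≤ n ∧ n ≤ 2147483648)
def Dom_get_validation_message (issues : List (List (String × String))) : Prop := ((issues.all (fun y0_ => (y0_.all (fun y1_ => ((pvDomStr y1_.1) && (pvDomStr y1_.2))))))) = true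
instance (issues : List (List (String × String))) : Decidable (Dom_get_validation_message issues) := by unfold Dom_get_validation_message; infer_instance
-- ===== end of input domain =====

-- B replaces A's two generator sums and four-branch format cascade by a single counting pass
-- plus list-assembly of message parts joined with " and " (objective: simpler).

-- ===== PORT A =====
-- issue['type'] : first match in the association list (dict lookup)
def pvTypeA (issue : List (String × String)) : Option String :=
  (issue.find? (fun p => p.1 == "type")).map (·.2)

def get_validation_message (issues : List (List (String × String))) : String :=
  let error_count : Int :=
    issues.foldl (fun acc issue => if pvTypeA issue = some "ERROR" then acc + 1 else acc) 0
  let warning_count : Int :=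
    issues.foldl (fun acc issue => if pvTypeA issue = some "WARNING" then acc + 1 else acc) 0
  if error_count > 0 ∧ warning_count > 0 then
    "Found " ++ PySem.Int.toStr error_count ++ " errors and " ++ PySem.Int.toStr warning_count ++ " warnings"
  else if error_count > 0 then
    "Found " ++ PySem.Int.toStr error_count ++ " errors"
  else if warning_count > 0 then
    "Found " ++ PySem.Int.toStr warning_count ++ " warnings"
  else
    "No issues found"

-- ===== PORT B =====
-- issue['type'] : first match in the association list (dict lookup)
def pvTypeB (issue : List (String × String)) : Option String :=
  (issue.find? (fun p => p.1 == "type")).map (·.2)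

def get_validation_message_alt (issues : List (List (String × String))) : String :=
  let counts : Int × Int :=
    issues.foldl (fun s issue =>
      match pvTypeB issue with
      | some t => if t == "ERROR" then (s.1 + 1, s.2)
                  else if t == "WARNING" then (s.1, s.2 + 1)
                  else s
      | none => s) (0, 0)
  let parts : List String :=
    (if counts.1 > 0 then [PySem.Int.toStr counts.1 ++ " errors"] else []) ++
    (if counts.2 > 0 then [PySem.Int.toStr counts.2 ++ " warnings"] else [])
  if parts ≠ [] then "Found " ++ PySem.Str.join " and " parts else "No issues found"

-- ===== PRECONDITION & SPEC =====
-- Pre_ excludes only inputs on which Python A raises KeyError: an issue dict with no 'type' key.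
def Pre_get_validation_message (issues : List (List (String × String))) : Prop :=
  (issues.all (fun issue => issue.any (fun p => p.1 == "type"))) = true
instance (issues : List (List (String × String))) : Decidable (Pre_get_validation_message issues) := by
  unfold Pre_get_validation_message; infer_instance

def pvWitness_get_validation_message : (List (List (String × String))) :=
  [[("type", "ERROR")], [("type", "WARNING"), ("msg", "x")]]

def Spec_get_validation_message (issues : List (List (String × String))) (out : String) : Prop := out = get_validation_message_alt issues
instance (issues : List (List (String × String))) (out : String) : Decidable (Spec_get_validation_message issues out) := by unfold Spec_get_validation_message; infer_instance

-- ===== CLAIM (what is proved, stated in full; the proofs are below) =====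
def Claim_equal_get_validation_message : Prop := ∀ (issues : List (List (String × String))), Dom_get_validation_message issues → Pre_get_validation_message issues → Spec_get_validation_message issues (get_validation_message issues)

-- ===== LEMMAS AND PROOFS =====

-- B's paired fold computes exactly A's two separate folds.
theorem pv_counts_eq (issues : List (List (String × String))) (e w : Int) :
    issues.foldl (fun s issue =>
      match pvTypeB issue with
      | some t => if t == "ERROR" then (s.1 + 1, s.2)
                  else if t == "WARNING" then (s.1, s.2 + 1)
                  else s
      | none => s) (e, w)
    = (issues.foldl (fun acc issue => if pvTypeA issue = some "ERROR" then acc + 1 else acc) e,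
       issues.foldl (fun acc issue => if pvTypeA issue = some "WARNING" then acc + 1 else acc) w) := by
  induction issues generalizing e w with
  | nil => rfl
  | cons i rest ih =>
    simp only [List.foldl_cons]
    rw [← ih]
    congr 1
    simp only [pvTypeB, pvTypeA]
    rcases h : (i.find? (fun p => p.1 == "type")).map (·.2) with _ | t
    · simp [h]
    · by_cases hE : t = "ERROR"
      · subst hE; simp [h]
      · by_cases hW : t = "WARNING"
        · subst hW; simp [h]
        · simp [h, hE, hW]

theorem pv_str_eq1 (a b : String) :
    "Found " ++ a ++ " errors and " ++ b ++ " warnings"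
      = "Found " ++ PySem.Str.join " and " [a ++ " errors", b ++ " warnings"] := by
  apply String.ext
  simp [PySem.Str.join, PySem.Chars.join, List.intercalate, List.intersperse]

theorem pv_str_eq2 (a : String) :
    "Found " ++ a ++ " errors" = "Found " ++ PySem.Str.join " and " [a ++ " errors"] := by
  apply String.ext
  simp [PySem.Str.join, PySem.Chars.join, List.intercalate]

theorem pv_str_eq3 (a : String) :
    "Found " ++ a ++ " warnings" = "Found " ++ PySem.Str.join " and " [a ++ " warnings"] := by
  apply String.ext
  simp [PySem.Str.join, PySem.Chars.join, List.intercalate]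

-- ===== VERDICT (by name: the statement is the Claim_ definition above) =====
theorem get_validation_message_spec : Claim_equal_get_validation_message := by
  intro issues _ _
  unfold Spec_get_validation_message get_validation_message get_validation_message_alt
  rw [pv_counts_eq]
  set e := issues.foldl (fun acc issue => if pvTypeA issue = some "ERROR" then acc + 1 else acc) (0 : Int) with he
  set w := issues.foldl (fun acc issue => if pvTypeA issue = some "WARNING" then acc + 1 else acc) (0 : Int) with hw
  by_cases hE : e > 0 <;> by_cases hW : w > 0 <;>
    simp [hE, hW, pv_str_eq1, pv_str_eq2, pv_str_eq3]
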